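-- pv_equiv track=rewrite | github.com/zahrabsheikh101-hub/newbattleshipedition2025 | finaldraftbattleship.py | checkShipStatus
-- ===== SOURCE A (Python) =====
-- def checkShipStatus(shipList, shipMap):
--     shipStatus = []
--     for index in range(len(shipList)):
--         shipStatus.append(False)
--     for index in range(len(shipList)):
--         for row in shipMap:
--             if shipList[index] in row:
--                 shipStatus[index] = True
--     return shipStatus
-- ===== SOURCE B (Python) =====
-- def checkShipStatus(shipList, shipMap):
--     present = set()
--     for row in shipMap:
--         present.update(row)
--     return [ship in present for ship in shipList]
-- ===== Notes on version B (the rewrite author's own statement) =====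
-- stated objective: faster
-- what changed: B collects every cell of the map into a set in one pass and answers each ship by a set-membership test, instead of A's rescan of the whole map once per ship.
import Mathlib
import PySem

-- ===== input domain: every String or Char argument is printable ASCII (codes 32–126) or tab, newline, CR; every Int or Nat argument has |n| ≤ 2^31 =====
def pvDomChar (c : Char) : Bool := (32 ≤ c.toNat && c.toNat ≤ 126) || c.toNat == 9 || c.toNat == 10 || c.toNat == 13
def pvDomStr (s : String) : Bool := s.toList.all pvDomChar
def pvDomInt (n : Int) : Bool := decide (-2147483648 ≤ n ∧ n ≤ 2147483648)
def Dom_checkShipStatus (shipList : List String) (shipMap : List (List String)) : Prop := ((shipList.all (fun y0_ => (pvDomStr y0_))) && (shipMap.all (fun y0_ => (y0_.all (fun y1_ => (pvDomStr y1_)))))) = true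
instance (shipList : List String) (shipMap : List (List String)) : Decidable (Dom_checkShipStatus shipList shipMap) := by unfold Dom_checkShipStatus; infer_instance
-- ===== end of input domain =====

-- B replaces A's per-ship rescan of the whole map by one pass that collects all cells
-- into a set, then a single membership test per ship (objective: faster, asymptotic).


-- ===== PORT A =====
-- Literal port: first loop appends False once per ship; second loop, for each index
-- and each row, sets shipStatus[index] := True when shipList[index] is in row.
-- Indices come from range(len(shipList)), so they are always in range; 'getD _ ""'
-- is exact there (the default is never used). 'shipList[index] in row' on a list of
-- strings is element membership, i.e. List.contains.
def checkShipStatus (shipList : List String) (shipMap : List (List String)) : List Bool :=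
  let shipStatus : List Bool :=
    (List.range shipList.length).foldl (fun acc _ => acc ++ [false]) []
  (List.range shipList.length).foldl
    (fun st index =>
      shipMap.foldl
        (fun st row =>
          if row.contains (shipList.getD index "") then st.set index true else st)
        st)
    shipStatus

-- ===== PORT B =====
def checkShipStatus_alt (shipList : List String) (shipMap : List (List String)) : List Bool :=
  let present : PySem.Set String :=
    shipMap.foldl (fun s row => PySem.Set.update s row) PySem.Set.empty
  shipList.map (fun ship => PySem.Set.contains present ship)

-- ===== PRECONDITION & SPEC =====
def Spec_checkShipStatus (shipList : List String) (shipMap : List (List String)) (out : List Bool) : Prop := out = checkShipStatus_alt shipList shipMap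
instance (shipList : List String) (shipMap : List (List String)) (out : List Bool) : Decidable (Spec_checkShipStatus shipList shipMap out) := by unfold Spec_checkShipStatus; infer_instance

-- ===== CLAIM (what is proved, stated in full; the proofs are below) =====
def Claim_equal_checkShipStatus : Prop := ∀ (shipList : List String) (shipMap : List (List String)), Dom_checkShipStatus shipList shipMap → Spec_checkShipStatus shipList shipMap (checkShipStatus shipList shipMap)

-- ===== LEMMAS AND PROOFS =====

-- Membership in B's accumulated set = membership in some row of the map.
theorem mem_foldl_update (l : List (List String)) (s : PySem.Set String) (y : String) :
    y ∈ l.foldl (fun s row => PySem.Set.update s row) s ↔ y ∈ s ∨ ∃ r ∈ l, y ∈ r := by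
  induction l generalizing s with
  | nil => simp
  | cons r t ih =>
    simp only [List.foldl_cons, ih, PySem.Set.mem_update, List.mem_cons]
    constructor
    · rintro ((h | h) | ⟨r', hr', hy⟩)
      · exact Or.inl h
      · exact Or.inr ⟨r, Or.inl rfl, h⟩
      · exact Or.inr ⟨r', Or.inr hr', hy⟩
    · rintro (h | ⟨r', (rfl | hr'), hy⟩)
      · exact Or.inl (Or.inl h)
      · exact Or.inl (Or.inr hy)
      · exact Or.inr ⟨r', hr', hy⟩

-- A's inner loop over the rows: it sets index `i` to true iff some row contains x.
theorem inner_loop_eq (shipMap : List (List String)) (x : String) (i : Nat) (st : List Bool) :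
    shipMap.foldl (fun st row => if row.contains x then st.set i true else st) st
      = if shipMap.any (fun row => row.contains x) then st.set i true else st := by
  induction shipMap generalizing st with
  | nil => simp
  | cons r t ih =>
    rw [List.foldl_cons, List.any_cons]
    by_cases h : r.contains x = true
    · rw [if_pos h, h, Bool.true_or, if_pos rfl, ih]
      split
      · rw [List.set_set]
      · rfl
    · have h0 : r.contains x = false := Bool.not_eq_true _ |>.mp h
      rw [if_neg h, ih, h0, Bool.false_or]

-- A's outer loop, read off entrywise.
theorem foldl_set_getElem? (p : Nat → Bool) (l : List Nat) (st : List Bool) (j : Nat) :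
    (l.foldl (fun st i => if p i then st.set i true else st) st)[j]? =
      if j ∈ l ∧ p j = true ∧ j < st.length then some true else st[j]? := by
  induction l generalizing st with
  | nil => simp
  | cons i t ih =>
    simp only [List.foldl_cons]
    by_cases hpi : p i = true
    · rw [if_pos hpi, ih, List.length_set]
      by_cases c1 : j ∈ t ∧ p j = true ∧ j < st.length
      · rw [if_pos c1, if_pos ⟨List.mem_cons_of_mem i c1.1, c1.2⟩]
      · rw [if_neg c1, List.getElem?_set]
        by_cases c2 : j ∈ i :: t ∧ p j = true ∧ j < st.length
        · have hji : i = j := by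
            rcases c2 with ⟨hm, hpj, hlt⟩
            rcases List.mem_cons.mp hm with h | h
            · exact h.symm
            · exact absurd ⟨h, hpj, hlt⟩ c1
          rw [if_pos hji, if_pos (hji ▸ c2.2.2), if_pos c2]
        · rw [if_neg c2]
          by_cases hji : i = j
          · subst hji
            have hlt : ¬ i < st.length := fun h => c2 ⟨by simp, hpi, h⟩
            simp [hlt]
          · rw [if_neg hji]
    · rw [if_neg hpi, ih]
      by_cases hji : j = i
      · subst hji; simp [hpi]
      · simp [hji]

-- A's outer loop with the inner row loop replaced by its closed form.
theorem outer_congr (shipList : List String) (shipMap : List (List String)) (st : List Bool) :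
    (List.range shipList.length).foldl (fun st index =>
        shipMap.foldl (fun st row =>
          if row.contains (shipList.getD index "") then st.set index true else st) st) st
      = (List.range shipList.length).foldl (fun st i =>
          if shipMap.any (fun row => row.contains (shipList.getD i "")) then st.set i true else st) st :=
  PySem.List.foldl_congr_mem _ _ _ _ (fun st i _ => inner_loop_eq shipMap (shipList.getD i "") i st)

-- The two membership tests agree: "some row of the map contains x" = "x is in B's set".
theorem any_eq_set_contains (shipMap : List (List String)) (x : String) :
    shipMap.any (fun row => row.contains x)
      = PySem.Set.contains
          (shipMap.foldl (fun s row => PySem.Set.update s row) PySem.Set.empty) x := by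
  cases hA : shipMap.any (fun row => row.contains x) with
  | true =>
    obtain ⟨r, hr, hcr⟩ := List.any_eq_true.mp hA
    exact ((PySem.Set.contains_iff _ _).mpr
      ((mem_foldl_update shipMap PySem.Set.empty x).mpr
        (Or.inr ⟨r, hr, by simpa using hcr⟩))).symm
  | false =>
    symm
    rw [Bool.eq_false_iff]
    intro hB
    rcases (mem_foldl_update shipMap PySem.Set.empty x).mp
      ((PySem.Set.contains_iff _ _).mp hB) with h | ⟨r, hr, hy⟩
    · exact absurd h (by simp [PySem.Set.empty])
    · have := List.any_eq_false.mp hA r hr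
      exact this (by simpa using hy)

theorem checkShipStatus_getElem? (shipList : List String) (shipMap : List (List String)) (j : Nat) :
    (checkShipStatus shipList shipMap)[j]? =
      if j < shipList.length
      then some (shipMap.any (fun row => row.contains (shipList.getD j "")))
      else none := by
  unfold checkShipStatus
  rw [PySem.List.foldl_append_singleton_eq_map, List.nil_append, outer_congr,
    foldl_set_getElem?]
  have hlen : ((List.range shipList.length).map (fun _ => false)).length = shipList.length := by
    rw [List.length_map, List.length_range]
  by_cases hj : j < shipList.length
  · by_cases hp : shipMap.any (fun row => row.contains (shipList.getD j "")) = true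
    · rw [if_pos ⟨List.mem_range.mpr hj, hp, by omega⟩, if_pos hj, hp]
    · have hp0 := Bool.not_eq_true _ |>.mp hp
      rw [if_neg (by tauto), if_pos hj, hp0, List.getElem?_map,
        List.getElem?_range hj]
      rfl
  · rw [if_neg (by simp [List.mem_range]; omega), if_neg hj,
      List.getElem?_eq_none_iff.mpr (by omega)]

-- ===== VERDICT (by name: the statement is the Claim_ definition above) =====
theorem checkShipStatus_spec : Claim_equal_checkShipStatus := by
  intro shipList shipMap _
  unfold Spec_checkShipStatus
  apply List.ext_getElem?
  intro j
  rw [checkShipStatus_getElem?]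
  unfold checkShipStatus_alt
  rw [List.getElem?_map]
  by_cases hj : j < shipList.length
  · rw [if_pos hj, List.getElem?_eq_getElem hj, Option.map_some]
    have hgetD : shipList[j] = shipList.getD j "" := by
      rw [List.getD_eq_getElem?_getD, List.getElem?_eq_getElem hj]; rfl
    rw [hgetD, any_eq_set_contains]
  · rw [if_neg hj, List.getElem?_eq_none_iff.mpr (by omega), Option.map_none]
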